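-- pv_equiv track=rewrite | github.com/elice-algorithm-study/codingtest | jinjong/220201-06.py | solution
-- ===== SOURCE A (Python) =====
-- def func(word):
--     for i in range(len(word)):
--         if i%2!=0:
--             word = word[:i] + word[i].lower() + word[i+1:]
--         else:
--             word = word[:i] + word[i].upper() + word[i+1:]
--     return word
--
-- def solution(s):
--     answer = ''
--     word = ''
--     i = 0
--     while(i!=len(s)):
--         if s[i]==' ':
--             if word!='':
--                 answer += func(word)
--                 word = ''
--             answer += ' '
--         else:
--             word += s[i]
--         if i == len(s)-1:
--             if word!='':
--                 answer += func(word)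
--             break
--         i+=1
--
--     return answer
-- ===== SOURCE B (Python) =====
-- def solution(s):
--     out = []
--     k = 0
--     for ch in s:
--         if ch == ' ':
--             out.append(' ')
--             k = 0
--         else:
--             out.append(ch.upper() if k % 2 == 0 else ch.lower())
--             k += 1
--     return ''.join(out)
-- ===== Notes on version B (the rewrite author's own statement) =====
-- stated objective: simpler
-- what changed: Replaced the collect-word-then-rescan two-phase structure (with the quadratic slice-rebuilding func helper) by one linear pass that keeps an in-word index counter reset at each space.
import Mathlib
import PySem

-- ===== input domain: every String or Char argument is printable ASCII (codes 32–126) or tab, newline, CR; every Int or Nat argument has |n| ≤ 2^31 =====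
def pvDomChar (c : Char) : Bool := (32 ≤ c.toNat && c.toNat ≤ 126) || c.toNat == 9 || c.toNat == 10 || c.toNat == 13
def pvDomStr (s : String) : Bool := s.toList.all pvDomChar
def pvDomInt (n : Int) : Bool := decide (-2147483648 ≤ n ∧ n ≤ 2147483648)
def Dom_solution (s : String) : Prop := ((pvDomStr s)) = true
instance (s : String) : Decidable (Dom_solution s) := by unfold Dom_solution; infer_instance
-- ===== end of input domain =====

-- B replaces A's collect-word-then-rescan structure (with its slice-rebuilding `func` helper)
-- by one linear pass with an in-word counter reset at each space; objective: simpler.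

-- ===== PORT A =====
-- func(word): for i in range(len(word)): word = word[:i] + cased word[i] + word[i+1:]
-- (word[i] is always in range — each rebuild preserves the length — so pyGetD is exact here)
def funcA (word : List Char) : List Char :=
  (PySem.List.pyRange 0 (word.length : Int) 1).foldl
    (fun w i =>
      PySem.List.slice w none (some i) ++
        (if PySem.Int.mod i 2 ≠ 0
          then [PySem.Chars.lowerChar (PySem.List.pyGetD w i ' ')]
          else [PySem.Chars.upperChar (PySem.List.pyGetD w i ' ')]) ++
        PySem.List.slice w (some (i + 1)) none)
    word

-- A's while loop; s[i] is always in range (0 ≤ i < len s), so getD is exact.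
-- Python's trailing "if i == len(s)-1: if word != '': answer += func(word); break" is placed in
-- each branch with that branch's current word: after the space branch word was just reset to ''
-- (the check is false, return answer'); after the other branch word' = word + s[i] (checked as written).
def loopA (s : List Char) (i : Nat) (answer word : List Char) : List Char :=
  if _h : i < s.length then
    if s.getD i ' ' = ' ' then
      let answer' := (if word ≠ [] then answer ++ funcA word else answer) ++ [' ']
      if i = s.length - 1 then answer'
      else loopA s (i + 1) answer' []
    else
      let word' := word ++ [s.getD i ' ']
      if i = s.length - 1 then (if word' ≠ [] then answer ++ funcA word' else answer)
      else loopA s (i + 1) answer word'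
  else answer
termination_by s.length - i

def solution (s : String) : String := String.ofList (loopA s.toList 0 [] [])

-- ===== PORT B =====
-- one pass; state = (output chars so far, index within the current word)
def stepB (st : List Char × Nat) (ch : Char) : List Char × Nat :=
  if ch = ' ' then (st.1 ++ [' '], 0)
  else (st.1 ++ [if st.2 % 2 = 0 then PySem.Chars.upperChar ch else PySem.Chars.lowerChar ch],
        st.2 + 1)

def solution_alt (s : String) : String := String.ofList (s.toList.foldl stepB ([], 0)).1

-- ===== PRECONDITION & SPEC =====
def Spec_solution (s : String) (out : String) : Prop := out = solution_alt s
instance (s : String) (out : String) : Decidable (Spec_solution s out) := by unfold Spec_solution; infer_instance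

-- ===== CLAIM (what is proved, stated in full; the proofs are below) =====
def Claim_equal_solution : Prop := ∀ (s : String), Dom_solution s → Spec_solution s (solution s)

-- ===== LEMMAS AND PROOFS =====

-- the alternating-case transform of one word, starting at in-word index k
def caseChar (k : Nat) (c : Char) : Char :=
  if k % 2 = 0 then PySem.Chars.upperChar c else PySem.Chars.lowerChar c

def caseAlt : Nat → List Char → List Char
  | _, [] => []
  | k, c :: cs => caseChar k c :: caseAlt (k + 1) cs

theorem caseAlt_length (k : Nat) (w : List Char) : (caseAlt k w).length = w.length := by
  induction w generalizing k with
  | nil => rfl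
  | cons c cs ih => simp [caseAlt, ih]

theorem caseAlt_append_singleton (k : Nat) (w : List Char) (c : Char) :
    caseAlt k (w ++ [c]) = caseAlt k w ++ [caseChar (k + w.length) c] := by
  induction w generalizing k with
  | nil => simp [caseAlt]
  | cons d ds ih =>
      simp only [List.cons_append, caseAlt, ih (k + 1), List.length_cons]
      have h : k + 1 + ds.length = k + (ds.length + 1) := by omega
      rw [h]

-- one step of funcA's fold, on the invariant shape (stated beta-reduced, as it appears in the fold)
theorem funcA_step (w : List Char) (j : Nat) (hj : j < w.length) :
    (PySem.List.slice (caseAlt 0 (w.take j) ++ w.drop j) none (some (j : Int)) ++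
        (if PySem.Int.mod (j : Int) 2 ≠ 0
          then [PySem.Chars.lowerChar (PySem.List.pyGetD (caseAlt 0 (w.take j) ++ w.drop j) (j : Int) ' ')]
          else [PySem.Chars.upperChar (PySem.List.pyGetD (caseAlt 0 (w.take j) ++ w.drop j) (j : Int) ' ')])) ++
      PySem.List.slice (caseAlt 0 (w.take j) ++ w.drop j) (some ((j : Int) + 1)) none
    = caseAlt 0 (w.take (j + 1)) ++ w.drop (j + 1) := by
  have hlen : (caseAlt 0 (w.take j)).length = j := by
    rw [caseAlt_length]; simp [Nat.le_of_lt hj]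
  have hdrop : w.drop j = w[j] :: w.drop (j + 1) := List.drop_eq_getElem_cons hj
  have hcast : ((j : Int) + 1) = ((j + 1 : Nat) : Int) := by push_cast; ring
  rw [hcast, PySem.List.slice_to_natCast, PySem.List.slice_from_natCast, hdrop]
  have htake : (caseAlt 0 (w.take j) ++ w[j] :: w.drop (j + 1)).take j = caseAlt 0 (w.take j) :=
    List.take_left' hlen
  have hdrop2 : (caseAlt 0 (w.take j) ++ w[j] :: w.drop (j + 1)).drop (j + 1) = w.drop (j + 1) := by
    have h : caseAlt 0 (w.take j) ++ w[j] :: w.drop (j + 1)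
        = (caseAlt 0 (w.take j) ++ [w[j]]) ++ w.drop (j + 1) := by simp
    rw [h, List.drop_left']; simp [hlen]
  have hget : PySem.List.pyGetD (caseAlt 0 (w.take j) ++ w[j] :: w.drop (j + 1)) (j : Int) ' '
      = w[j] := by
    rw [PySem.List.pyGetD_natCast, List.getD_eq_getElem?_getD,
        List.getElem?_append_right (le_of_eq hlen), hlen]
    simp [List.getElem?_eq_getElem hj]
  rw [htake, hdrop2, hget]
  have htake1 : w.take (j + 1) = w.take j ++ [w[j]] := by
    rw [List.take_add_one]; simp [hj]
  rw [htake1, caseAlt_append_singleton]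
  have hlen2 : 0 + (w.take j).length = j := by simp [Nat.le_of_lt hj]
  rw [hlen2]
  by_cases h2 : j % 2 = 0
  · have hc : ¬((j : Int) % 2 = 1) := by omega
    simp [hc, caseChar, h2]
  · have h1 : j % 2 = 1 := by omega
    have hc : (j : Int) % 2 = 1 := by omega
    simp [hc, caseChar, h1]

theorem funcA_inv (w : List Char) (j : Nat) (hj : j ≤ w.length) :
    (PySem.List.pyRange (j : Int) (w.length : Int) 1).foldl
      (fun v i =>
        PySem.List.slice v none (some i) ++
          (if PySem.Int.mod i 2 ≠ 0
            then [PySem.Chars.lowerChar (PySem.List.pyGetD v i ' ')]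
            else [PySem.Chars.upperChar (PySem.List.pyGetD v i ' ')]) ++
          PySem.List.slice v (some (i + 1)) none)
      (caseAlt 0 (w.take j) ++ w.drop j)
    = caseAlt 0 w := by
  rcases Nat.lt_or_ge j w.length with hlt | hge
  · rw [PySem.List.pyRange_one_cons (by exact_mod_cast hlt), List.foldl_cons]
    have hc : ((j : Int) + 1) = ((j + 1 : Nat) : Int) := by push_cast; ring
    rw [funcA_step w j hlt, hc]
    exact funcA_inv w (j + 1) hlt
  · have hje : j = w.length := le_antisymm hj hge
    subst hje
    rw [PySem.List.pyRange_one_eq_nil (le_refl _)]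
    simp
termination_by w.length - j

theorem funcA_eq (w : List Char) : funcA w = caseAlt 0 w := by
  have h := funcA_inv w 0 (Nat.zero_le _)
  simpa [funcA] using h

theorem loopA_eq (s : List Char) (i : Nat) (answer word : List Char) (hi : i < s.length) :
    loopA s i answer word
      = ((s.drop i).foldl stepB (answer ++ caseAlt 0 word, word.length)).1 := by
  rw [loopA, dif_pos hi]
  have hget : s.getD i ' ' = s[i] := List.getD_eq_getElem s ' ' hi
  have hdrop : s.drop i = s[i] :: s.drop (i + 1) := List.drop_eq_getElem_cons hi
  rw [hget, hdrop, List.foldl_cons]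
  by_cases hsp : s[i] = ' '
  · -- space: A flushes the pending word then a space; B appends a space and resets the counter
    rw [if_pos hsp]
    have hstep : stepB (answer ++ caseAlt 0 word, word.length) s[i] =
        ((if word ≠ [] then answer ++ funcA word else answer) ++ [' '], 0) := by
      cases word with
      | nil => simp [stepB, hsp, caseAlt]
      | cons c cs => simp [stepB, hsp, funcA_eq]
    rw [hstep]
    by_cases hlast : i = s.length - 1
    · rw [if_pos hlast]
      have hnil : s.drop (i + 1) = [] := List.drop_eq_nil_of_le (by omega)
      rw [hnil]
      simp
    · rw [if_neg hlast, loopA_eq s (i + 1) _ [] (by omega)]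
      simp [caseAlt]
  · -- non-space: A accumulates the raw char; B emits the cased char and bumps the counter
    rw [if_neg hsp]
    have hstep : stepB (answer ++ caseAlt 0 word, word.length) s[i] =
        (answer ++ caseAlt 0 (word ++ [s[i]]), word.length + 1) := by
      simp [stepB, hsp, caseAlt_append_singleton, caseChar]
    rw [hstep]
    by_cases hlast : i = s.length - 1
    · rw [if_pos hlast]
      have hnil : s.drop (i + 1) = [] := List.drop_eq_nil_of_le (by omega)
      rw [hnil]
      simp [funcA_eq]
    · rw [if_neg hlast, loopA_eq s (i + 1) answer (word ++ [s[i]]) (by omega)]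
      simp
termination_by s.length - i

-- ===== VERDICT (by name: the statement is the Claim_ definition above) =====
theorem solution_spec : Claim_equal_solution := by
  intro s _
  unfold Spec_solution solution solution_alt
  by_cases h : s.toList.length = 0
  · have hnil : s.toList = [] := List.eq_nil_of_length_eq_zero h
    rw [loopA]
    simp [hnil]
  · rw [loopA_eq s.toList 0 [] [] (by omega)]
    simp [caseAlt]
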